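-- pv_equiv track=rewrite | github.com/Kkiirra3/inserterCV | src/core/template_processor.py | get_skills_sections
-- ===== SOURCE A (Python) =====
-- def get_skills_sections(template_data):
--     """
--     Forms lists of keys and values from skills section as separate blocks,
--     where each section is added sequentially with the same formatting
--     """
--     skills = template_data['skills']['skills']
--
--     # Format first key-value pair for placeholder replacement
--     first_section = True
--     result_keys = []
--     result_values = []
--     first_result = {}
--
--     for key, values_list in skills.items():
--         # Skip introduction as it's not a skill
--         if key == 'introduction':
--             continue
--
--         # Format header from snake_case to Title Case
--         header = key.replace('_', ' ').title()
--
--         # Format values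
--         if isinstance(values_list, list):
--             # For lists join elements with comma
--             value = ', '.join(str(item) for item in values_list)
--         else:
--             value = str(values_list)
--
--         # Add period at the end if not present
--         if not value.endswith('.'):
--             value = value + '.'
--
--         # For first section use placeholders
--         if first_section:
--             first_result = {
--                 '{{SKILLS_KEY}}': header,
--                 '{{SKILLS_VALUE}}': value
--             }
--             first_section = False
--         else:
--             # For subsequent sections add to lists
--             result_keys.append(header)
--             result_values.append(value)
--
--     return first_result, result_keys, result_values
-- ===== SOURCE B (Python) =====
-- def get_skills_sections(template_data):
--     """
--     Forms lists of keys and values from skills section as separate blocks,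
--     where each section is added sequentially with the same formatting
--     """
--     skills = template_data['skills']['skills']
--     return _first(list(skills.items()))
--
--
-- def _fmt(key, values_list):
--     header = key.replace('_', ' ').title()
--     if isinstance(values_list, list):
--         value = ', '.join(str(item) for item in values_list)
--     else:
--         value = str(values_list)
--     return header, value if value.endswith('.') else value + '.'
--
--
-- def _first(items):
--     # recursively skip 'introduction' entries until the first real section,
--     # which becomes the placeholder dict; the tail is collected by _rest
--     if not items:
--         return {}, [], []
--     key, vals = items[0]
--     if key == 'introduction':
--         return _first(items[1:])
--     header, value = _fmt(key, vals)
--     ks, vs = _rest(items[1:])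
--     return {'{{SKILLS_KEY}}': header, '{{SKILLS_VALUE}}': value}, ks, vs
--
--
-- def _rest(items):
--     # recursion builds both lists back-to-front by prepending
--     if not items:
--         return [], []
--     key, vals = items[0]
--     if key == 'introduction':
--         return _rest(items[1:])
--     header, value = _fmt(key, vals)
--     ks, vs = _rest(items[1:])
--     return [header] + ks, [value] + vs
-- ===== Notes on version B (the rewrite author's own statement) =====
-- stated objective: alternative
-- what changed: Replaces A's single flag-driven loop over four accumulators by a recursive decomposition: _first recursively skips leading 'introduction' entries and turns the first real section into the placeholder dict, and _rest recursively builds the two tail lists back-to-front by prepending.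
import Mathlib
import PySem

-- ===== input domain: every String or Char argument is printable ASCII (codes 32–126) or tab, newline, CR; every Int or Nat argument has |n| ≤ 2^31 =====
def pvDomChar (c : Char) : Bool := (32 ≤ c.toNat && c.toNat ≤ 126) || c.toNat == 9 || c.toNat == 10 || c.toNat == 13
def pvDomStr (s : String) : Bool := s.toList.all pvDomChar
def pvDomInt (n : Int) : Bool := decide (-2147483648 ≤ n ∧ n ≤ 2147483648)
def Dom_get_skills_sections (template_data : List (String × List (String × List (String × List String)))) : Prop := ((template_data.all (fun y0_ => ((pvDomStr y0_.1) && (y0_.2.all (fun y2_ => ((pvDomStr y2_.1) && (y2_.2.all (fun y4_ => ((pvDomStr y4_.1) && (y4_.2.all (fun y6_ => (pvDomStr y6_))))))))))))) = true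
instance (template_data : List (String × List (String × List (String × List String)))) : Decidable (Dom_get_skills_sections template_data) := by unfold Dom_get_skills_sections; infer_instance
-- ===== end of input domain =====

-- B replaces A's flag-driven loop by a recursive decomposition: one recursion finds the
-- first real section (the placeholder dict), a second collects the tail lists by prepending.

-- ===== PORT A =====
-- hand port of str.title(), exact on ASCII (where Python's 'cased' = alphabetic)
def pyTitleGo : Bool → List Char → List Char
  | _, [] => []
  | prev, c :: rest =>
    if PySem.Chars.isalpha c then
      (if prev then PySem.Chars.lowerChar c else PySem.Chars.upperChar c) :: pyTitleGo true rest
    else c :: pyTitleGo false rest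

def pyTitle (s : String) : String := String.ofList (pyTitleGo false s.toList)

def get_skills_sections (template_data : List (String × List (String × List (String × List String)))) : (List (String × String)) × List String × List String :=
  match PySem.Dict.get? (PySem.Dict.ofList template_data) "skills" with
  | none => ([], [], [])   -- KeyError in Python; excluded by Pre_
  | some sk =>
    match PySem.Dict.get? (PySem.Dict.ofList sk) "skills" with
    | none => ([], [], [])   -- KeyError in Python; excluded by Pre_
    | some skillsList =>
      let st := (PySem.Dict.ofList skillsList).items.foldl
        (fun (st : Bool × List (String × String) × List String × List String) kv =>
          if kv.1 = "introduction" then st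
          else
            let header := pyTitle (PySem.Str.replace kv.1 "_" " ")
            let value := PySem.Str.join ", " kv.2
            let value := if PySem.Str.endswith value "." then value else value ++ "."
            if st.1 then
              (false, [("{{SKILLS_KEY}}", header), ("{{SKILLS_VALUE}}", value)], st.2.2.1, st.2.2.2)
            else
              (st.1, st.2.1, st.2.2.1 ++ [header], st.2.2.2 ++ [value]))
        (true, [], [], [])
      (st.2.1, st.2.2.1, st.2.2.2)

-- ===== PORT B =====
def fmtPair (kv : String × List String) : String × String :=
  let header := pyTitle (PySem.Str.replace kv.1 "_" " ")
  let value := PySem.Str.join ", " kv.2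
  (header, if PySem.Str.endswith value "." then value else value ++ ".")

-- port of _rest: builds both tail lists back-to-front by prepending
def pvRest : List (String × List String) → List String × List String
  | [] => ([], [])
  | kv :: rest =>
    if kv.1 = "introduction" then pvRest rest
    else
      let p := fmtPair kv
      let r := pvRest rest
      (p.1 :: r.1, p.2 :: r.2)

-- port of _first: skips leading 'introduction' entries, first real section becomes the dict
def pvFirst : List (String × List String) → (List (String × String)) × List String × List String
  | [] => ([], [], [])
  | kv :: rest =>
    if kv.1 = "introduction" then pvFirst rest
    else
      let p := fmtPair kv
      let r := pvRest rest
      ([("{{SKILLS_KEY}}", p.1), ("{{SKILLS_VALUE}}", p.2)], r.1, r.2)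

def get_skills_sections_alt (template_data : List (String × List (String × List (String × List String)))) : (List (String × String)) × List String × List String :=
  match PySem.Dict.get? (PySem.Dict.ofList template_data) "skills" with
  | none => ([], [], [])   -- KeyError in Python; excluded by Pre_
  | some sk =>
    match PySem.Dict.get? (PySem.Dict.ofList sk) "skills" with
    | none => ([], [], [])   -- KeyError in Python; excluded by Pre_
    | some skillsList => pvFirst (PySem.Dict.ofList skillsList).items

-- ===== PRECONDITION & SPEC =====
-- Pre_ excludes exactly the inputs on which Python raises KeyError: template_data['skills'] or its ['skills'] missing.
def Pre_get_skills_sections (template_data : List (String × List (String × List (String × List String)))) : Prop :=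
  ((PySem.Dict.get? (PySem.Dict.ofList template_data) "skills").bind
    (fun sk => PySem.Dict.get? (PySem.Dict.ofList sk) "skills")).isSome = true

instance (template_data : List (String × List (String × List (String × List String)))) : Decidable (Pre_get_skills_sections template_data) := by unfold Pre_get_skills_sections; infer_instance

def pvWitness_get_skills_sections : (List (String × List (String × List (String × List String)))) :=
  [("skills", [("skills", [("prog_langs", ["Python", "C++"])])])]

def Spec_get_skills_sections (template_data : List (String × List (String × List (String × List String)))) (out : (List (String × String)) × List String × List String) : Prop := out = get_skills_sections_alt template_data
instance (template_data : List (String × List (String × List (String × List String)))) (out : (List (String × String)) × List String × List String) : Decidable (Spec_get_skills_sections template_data out) := by unfold Spec_get_skills_sections; infer_instance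

-- ===== CLAIM (what is proved, stated in full; the proofs are below) =====
def Claim_equal_get_skills_sections : Prop := ∀ (template_data : List (String × List (String × List (String × List String)))), Dom_get_skills_sections template_data → Pre_get_skills_sections template_data → Spec_get_skills_sections template_data (get_skills_sections template_data)

-- ===== LEMMAS AND PROOFS =====

def pvStep (st : Bool × List (String × String) × List String × List String) (kv : String × List String) : Bool × List (String × String) × List String × List String :=
  if kv.1 = "introduction" then st
  else
    let header := pyTitle (PySem.Str.replace kv.1 "_" " ")
    let value := PySem.Str.join ", " kv.2
    let value := if PySem.Str.endswith value "." then value else value ++ "."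
    if st.1 then
      (false, [("{{SKILLS_KEY}}", header), ("{{SKILLS_VALUE}}", value)], st.2.2.1, st.2.2.2)
    else
      (st.1, st.2.1, st.2.2.1 ++ [header], st.2.2.2 ++ [value])

lemma pvFold_after (l : List (String × List String)) :
    ∀ fr ks vs, l.foldl pvStep (false, fr, ks, vs) =
      (false, fr, ks ++ (pvRest l).1, vs ++ (pvRest l).2) := by
  induction l with
  | nil => simp [pvRest]
  | cons kv rest ih =>
    intro fr ks vs
    by_cases h : kv.1 = "introduction"
    · simp [pvStep, pvRest, h, ih fr ks vs]
    · simp [pvStep, pvRest, h, ih, fmtPair]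

lemma pvFold_first (l : List (String × List String)) :
    l.foldl pvStep (true, [], [], []) =
      ((pvFirst l).1.isEmpty, pvFirst l) := by
  induction l with
  | nil => simp [pvFirst]
  | cons kv rest ih =>
    by_cases h : kv.1 = "introduction"
    · simp [pvStep, pvFirst, h, ih]
    · simp [pvStep, pvFirst, h, pvFold_after, fmtPair]

-- ===== VERDICT (by name: the statement is the Claim_ definition above) =====
theorem get_skills_sections_spec : Claim_equal_get_skills_sections := by
  intro td _ _
  unfold Spec_get_skills_sections get_skills_sections get_skills_sections_alt
  rcases h1 : PySem.Dict.get? (PySem.Dict.ofList td) "skills" with _ | sk <;>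
    simp only []
  rcases h2 : PySem.Dict.get? (PySem.Dict.ofList sk) "skills" with _ | sl <;>
    simp only []
  show (let st := (PySem.Dict.ofList sl).items.foldl pvStep (true, [], [], []);
        (st.2.1, st.2.2.1, st.2.2.2)) = _
  rw [pvFold_first]
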